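/-
  THE FIXED BINARIES: the contracts of `jsmn_run` / `jsmn_main` of the fixed images — `RunSpec` / `MainSpec` of Prog/Jsmn/Specs.lean restated against
  `Jsmn.parseFixed` from `Parser.init`: NO model-side precondition (`Inv.Init` is gone: `num_tokens ≤ 2^31` is no longer asked — with more the fixed
  jsmn_parse answers JSMN_ERROR_INVAL, which is `parseFixed`'s else-branch), no fuel. What remains is the layout: the array has `num_tokens` entries
  (`ToksArg`), `num_tokens` is a 32-bit number, and the buffers are where `Region` says.
-/
import Prog.Jsmn.Fixed.Specs
import Prog.Jsmn.RunLemmas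
import Prog.Jsmn.ResultRange
import Json.Jsmn.Safe

namespace X86
namespace J6
open X86.User (CodeAt RegsKept Span FlagsOK Layout toNat_add_ofNat toNat_ofNat_lt' add_ofNat_add)
open Jsmn

set_option linter.unusedVariables false

/-- `jsmn_run(js = rdi, len = rsi, tokens = rdx, num_tokens = ecx)` of a fixed image: `RunPre` without `Inv.Init`. -/
structure RunPreFixed (b : Bin) (n : User.Layout) (v0 : User.State) (ret jsA tb : Word) (js : List UInt8) (numTokens : Nat) (toks : Option Tokens) : Prop where
  call : Call b n b.run b.useRun ret v0
  rdi : v0.reg .rdi = jsA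
  rsi : v0.reg .rsi = UInt64.ofNat js.length
  rdx : v0.reg .rdx = tb
  rcx : Word.low .w32 (v0.reg .rcx) = UInt64.ofNat numTokens
  jslt : js.length < 2 ^ 64
  text : CodeAt v0.mem jsA js
  toksArg : ToksArg b.cfg v0.mem tb numTokens toks
  /-- `num_tokens` is an `unsigned int` (where `RunPre` has `Inv.Init`) -/
  nlt : numTokens < 2 ^ 32
  jsR : Region b n v0 b.useRun jsA js.length
  toksR : tb = 0 ∨ Region b n v0 b.useRun tb (toksBytes b.cfg numTokens toks)
  jsToks : jsA.toNat + js.length ≤ tb.toNat ∨ tb.toNat + toksBytes b.cfg numTokens toks ≤ jsA.toNat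

/-- **jsmn_run of a fixed image computes `Jsmn.parseFixed` from `Parser.init`.** -/
def RunSpecFixed (b : Bin) (n : User.Layout) : Prop :=
  ∀ v0 ret jsA tb js numTokens toks r p' toks', RunPreFixed b n v0 ret jsA tb js numTokens toks →
    parseFixed b.cfg js Parser.init toks numTokens = some (r, p', toks') →
    Reach n v0 (fun v => CallPost v0 b.useRun [(tb.toNat, tb.toNat + toksBytes b.cfg numTokens toks)] ret v ∧ RetInt v r ∧
      ToksArg b.cfg v.mem tb numTokens toks')

/-- `jsmn_main(js = rdi, len = rsi, out = rdx, num_tokens = ecx)` of a fixed image: `MainPre` with `num_tokens < 2^32` in place of `≤ 2^31`. -/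
structure MainPreFixed (b : Bin) (n : User.Layout) (v0 : User.State) (ret jsA out : Word) (js : List UInt8) (numTokens : Nat) (ts : Tokens) : Prop where
  call : Call b n b.main b.useMain ret v0
  rdi : v0.reg .rdi = jsA
  rsi : v0.reg .rsi = UInt64.ofNat js.length
  rdx : v0.reg .rdx = out
  rcx : Word.low .w32 (v0.reg .rcx) = UInt64.ofNat numTokens
  jslt : js.length < 2 ^ 64
  nlt : numTokens < 2 ^ 32
  text : CodeAt v0.mem jsA js
  tlen : ts.length = numTokens
  toks : TokensAt b.cfg v0.mem (out + 4) ts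
  jsR : Region b n v0 b.useMain jsA js.length
  outR : Region b n v0 b.useMain out (4 + b.cfg.tokSize * numTokens)
  jsOut : jsA.toNat + js.length ≤ out.toNat ∨ out.toNat + (4 + b.cfg.tokSize * numTokens) ≤ jsA.toNat

/-- **jsmn_main of a fixed image leaves `encodeResult r tokens` at `out` and returns its length**, `r` and `tokens` being what `parseFixed` computes. -/
def MainSpecFixed (b : Bin) (n : User.Layout) : Prop :=
  ∀ v0 ret jsA out js numTokens ts r p' ts', MainPreFixed b n v0 ret jsA out js numTokens ts →
    parseFixed b.cfg js Parser.init (some ts) numTokens = some (r, p', some ts') →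
    (0 ≤ r → r ≤ numTokens) →
    Reach n v0 (fun v => CallPost v0 b.useMain [(out.toNat, out.toNat + (4 + b.cfg.tokSize * numTokens))] ret v ∧
      v.reg .rax = UInt64.ofNat (encodeResult b.cfg r ts').length ∧ CodeAt v.mem out (encodeResult b.cfg r ts'))

/-- The token window of a `jsmn_run` call of a fixed image, NULL or not. -/
theorem RunPreFixed.toksW {b : Bin} {n : User.Layout} {v0 : User.State} {ret jsA tb : Word} {js : List UInt8} {numTokens : Nat} {toks : Option Tokens}
    (h : RunPreFixed b n v0 ret jsA tb js numTokens toks) : RegionW b n v0 b.useRun tb (toksBytes b.cfg numTokens toks) := by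
  rcases h.toksR with h0 | hR
  · cases toks with
    | none => subst h0; exact ⟨by simp [toksBytes], by simp [toksBytes], by simp [toksBytes]⟩
    | some ts => exact absurd h0 h.toksArg.1
  · exact hR.weak

/-- `Parser.init` has the types of a parser struct. -/
theorem typed_init {numTokens : Nat} (h : numTokens < 2 ^ 32) : Typed Parser.init numTokens :=
  ⟨by decide, by decide, by decide, h⟩

/-- The result of the fixed jsmn_parse fits an `int`. -/
theorem parseFixed_range {cfg : Jsmn.Config} {js : List UInt8} {p : Parser} {toks : Option Tokens} {n : Nat} {r : Int} {p' : Parser}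
    {toks' : Option Tokens} (ht : Typed p n) (hl : ∀ ts, toks = some ts → ts.length = n)
    (h : parseFixed cfg js p toks n = some (r, p', toks')) : -2147483648 ≤ r ∧ r < 2147483648 := by
  unfold parseFixed at h
  split at h
  · next hok => exact parseFuel_range (Jsmn.safeFacts cfg) (argsOk_inv ht hl hok).1 h
  · simp only [Option.some.injEq, Prod.mk.injEq] at h
    obtain ⟨rfl, -, -⟩ := h
    decide

end J6
end X86
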